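-- pv_equiv track=rewrite | github.com/Boti97/LHYP | k_boti/patient.py | get_frames_and_contours
-- ===== SOURCE A (Python) =====
-- class ContourFileError(Exception):
--     def __init__(self, message):
--         super().__init__(message)
--
-- def simplify_slc_frm_list(slc_frm_list, slc):
--     simple_slc_frm = []
--     for frm in slc_frm_list:
--         simple_slc_frm.append((slc, frm))
--     return simple_slc_frm
--
-- def get_frames_and_contours(contours):
--     max_frames_in_slc = 1
--     cont_list = []
--     frames = []
--     for slc in contours:
--         if len(contours[slc]) > max_frames_in_slc:
--             has_ln = True
--             has_lp = True
--             for con_frame in contours[slc]: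
--                 if has_ln and "ln" not in contours[slc][con_frame]:
--                     has_ln = False
--                 if has_lp and "lp" not in contours[slc][con_frame]:
--                     has_lp = False
--             if has_ln:
--                 cont_list.clear()
--                 max_frames_in_slc = len(contours[slc])
--                 frames = simplify_slc_frm_list(contours[slc], slc)
--                 for sl, frm in frames:
--                     cont_list.append(contours[slc][frm]["ln"])
--             elif has_lp:
--                 cont_list.clear()
--                 max_frames_in_slc = len(contours[slc])
--                 frames = simplify_slc_frm_list(contours[slc], slc)
--                 for sl, frm in frames:
--                     cont_list.append(contours[slc][frm]["lp"])
--     if frames.__len__() == 0: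
--         raise ContourFileError("Unable to locate diastoly and systoly.")
--     return frames, cont_list
-- ===== SOURCE B (Python) =====
-- class ContourFileError(Exception):
--     def __init__(self, message):
--         super().__init__(message)
--
-- def get_frames_and_contours(contours):
--     # Bucket the first qualifying slice of each frame-count into a dict, then
--     # pick the bucket with the largest frame-count; the qualifying key is found
--     # by intersecting the key sets of all frames of the slice.
--     first_by_len = {}
--     for slc, frms in contours.items():
--         if len(frms) > 1:
--             vals = list(frms.values())
--             common = set(vals[0])
--             for cont in vals[1:]:
--                 common &= set(cont)
--             if "ln" in common:
--                 first_by_len.setdefault(len(frms), (slc, frms, "ln"))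
--             elif "lp" in common:
--                 first_by_len.setdefault(len(frms), (slc, frms, "lp"))
--     if not first_by_len:
--         raise ContourFileError("Unable to locate diastoly and systoly.")
--     slc, frms, key = first_by_len[max(first_by_len)]
--     return [(slc, frm) for frm in frms], [cont[key] for cont in frms.values()]
-- ===== Notes on version B (the rewrite author's own statement) =====
-- stated objective: alternative
-- what changed: A's single left-to-right scan with a mutable running-max state machine and per-frame has_ln/has_lp flag loops is replaced by a hash-bucket algorithm: the key-set intersection of each slice's frames decides its qualifying key, the first qualifying slice of each frame-count is bucketed into a dict via setdefault, and the answer is read off the bucket of the maximal frame-count.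
import Mathlib
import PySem

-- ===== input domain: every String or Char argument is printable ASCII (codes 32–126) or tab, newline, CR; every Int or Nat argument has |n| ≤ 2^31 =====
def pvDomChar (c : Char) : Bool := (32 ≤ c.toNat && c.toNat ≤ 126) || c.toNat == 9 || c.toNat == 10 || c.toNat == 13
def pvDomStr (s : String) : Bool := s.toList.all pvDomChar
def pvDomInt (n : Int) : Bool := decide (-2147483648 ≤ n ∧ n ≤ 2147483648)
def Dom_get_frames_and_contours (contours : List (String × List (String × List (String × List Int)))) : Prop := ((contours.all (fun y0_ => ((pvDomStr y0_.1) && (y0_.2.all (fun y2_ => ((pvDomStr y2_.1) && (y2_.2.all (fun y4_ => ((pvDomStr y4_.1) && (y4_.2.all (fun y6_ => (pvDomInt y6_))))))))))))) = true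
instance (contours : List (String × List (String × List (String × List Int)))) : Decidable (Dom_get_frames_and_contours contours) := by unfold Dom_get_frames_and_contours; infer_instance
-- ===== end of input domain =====

-- B replaces A's running-max scan with flag loops by a bucket dict: intersect each slice's frame
-- key sets to find its qualifying key, setdefault the first qualifying slice per frame-count into a
-- dict, and read the answer off the maximal frame-count bucket (objective: alternative).
-- Both functions raise ContourFileError when no slice qualifies; those inputs are outside Pre_.

-- ===== PORT A =====
def pvSimplify (slc_frm_list : List (String × List (String × List Int))) (slc : String) : List (String × String) :=
  slc_frm_list.foldl (fun acc frm => acc ++ [(slc, frm.1)]) []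

def pvStepA (st : Nat × List (List Int) × List (String × String))
    (p : String × List (String × List (String × List Int))) :
    Nat × List (List Int) × List (String × String) :=
  if p.2.length > st.1 then
    let h := p.2.foldl (fun (h : Bool × Bool) cf =>
      let h1 := if h.1 && !((PySem.Dict.mk cf.2).contains "ln") then false else h.1
      let h2 := if h.2 && !((PySem.Dict.mk cf.2).contains "lp") then false else h.2
      (h1, h2)) (true, true)
    if h.1 then
      let frames' := pvSimplify p.2 p.1
      let cont' := frames'.foldl (fun acc sf =>
        acc ++ [(PySem.Dict.mk ((PySem.Dict.mk p.2).getD sf.2 [])).getD "ln" []]) []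
      (p.2.length, cont', frames')
    else if h.2 then
      let frames' := pvSimplify p.2 p.1
      let cont' := frames'.foldl (fun acc sf =>
        acc ++ [(PySem.Dict.mk ((PySem.Dict.mk p.2).getD sf.2 [])).getD "lp" []]) []
      (p.2.length, cont', frames')
    else st
  else st

def get_frames_and_contours (contours : List (String × List (String × List (String × List Int)))) : (List (String × String)) × List (List Int) :=
  let st := contours.foldl pvStepA (1, [], [])
  (st.2.2, st.2.1)

-- ===== PORT B =====
-- common = set(vals[0]); for cont in vals[1:]: common &= set(cont)
def pvCommon (frms : List (String × List (String × List Int))) : PySem.Set String :=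
  match frms with
  | [] => PySem.Set.empty   -- unreachable: only called when len(frms) > 1
  | c :: rest => rest.foldl (fun s cont => PySem.Set.inter s (PySem.Set.ofList (cont.2.map Prod.fst)))
      (PySem.Set.ofList (c.2.map Prod.fst))

def pvStepB (d : PySem.Dict Int (String × List (String × List (String × List Int)) × String))
    (p : String × List (String × List (String × List Int))) :
    PySem.Dict Int (String × List (String × List (String × List Int)) × String) :=
  if p.2.length > 1 then
    if (pvCommon p.2).contains "ln" then d.setdefault (p.2.length : Int) (p.1, p.2, "ln")
    else if (pvCommon p.2).contains "lp" then d.setdefault (p.2.length : Int) (p.1, p.2, "lp")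
    else d
  else d

def get_frames_and_contours_alt (contours : List (String × List (String × List (String × List Int)))) : (List (String × String)) × List (List Int) :=
  let d := contours.foldl pvStepB PySem.Dict.empty
  match PySem.List.max? d.keys (fun k => k) with
  | none => ([], [])   -- Python raises ContourFileError here; outside Pre_
  | some L =>
    let c := d.getD L ("", [], "")   -- first_by_len[max(first_by_len)]: the lookup always succeeds
    (c.2.1.map (fun frm => (c.1, frm.1)),
     c.2.1.map (fun cont => (PySem.Dict.mk cont.2).getD c.2.2 []))

-- ===== PRECONDITION & SPEC =====
-- Pre_ excludes (a) association lists with duplicate keys at any dict level, which no Python dict can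
-- produce (A's list-level behaviour there is accidental), and (b) inputs with no qualifying slice, on
-- which both A and B raise ContourFileError.
def Pre_get_frames_and_contours (contours : List (String × List (String × List (String × List Int)))) : Prop :=
  (contours.map Prod.fst).Nodup ∧
  (∀ p ∈ contours, (p.2.map Prod.fst).Nodup ∧ ∀ q ∈ p.2, (q.2.map Prod.fst).Nodup) ∧
  ∃ p ∈ contours, 1 < p.2.length ∧
    (p.2.all (fun q => (PySem.Dict.mk q.2).contains "ln") = true ∨
     p.2.all (fun q => (PySem.Dict.mk q.2).contains "lp") = true)
instance (contours : List (String × List (String × List (String × List Int)))) : Decidable (Pre_get_frames_and_contours contours) := by unfold Pre_get_frames_and_contours; infer_instance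

def pvWitness_get_frames_and_contours : (List (String × List (String × List (String × List Int)))) :=
  [("s", [("a", [("ln", [1])]), ("b", [("ln", [2])])])]

def Spec_get_frames_and_contours (contours : List (String × List (String × List (String × List Int)))) (out : (List (String × String)) × List (List Int)) : Prop := out = get_frames_and_contours_alt contours
instance (contours : List (String × List (String × List (String × List Int)))) (out : (List (String × String)) × List (List Int)) : Decidable (Spec_get_frames_and_contours contours out) := by unfold Spec_get_frames_and_contours; infer_instance

-- ===== CLAIM (what is proved, stated in full; the proofs are below) =====
def Claim_equal_get_frames_and_contours : Prop := ∀ (contours : List (String × List (String × List (String × List Int)))), Dom_get_frames_and_contours contours → Pre_get_frames_and_contours contours → Spec_get_frames_and_contours contours (get_frames_and_contours contours)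

-- ===== LEMMAS AND PROOFS =====

-- the key A/B agree on for a slice: "ln" if every frame has it, else "lp" if every frame has it,
-- provided the slice has more than one frame
def pvKeyOf (frms : List (String × List (String × List Int))) : Option String :=
  if 1 < frms.length then
    if frms.all (fun c => (PySem.Dict.mk c.2).contains "ln") then some "ln"
    else if frms.all (fun c => (PySem.Dict.mk c.2).contains "lp") then some "lp"
    else none
  else none

def pvOut (c : String × List (String × List (String × List Int)) × String) :
    (List (String × String)) × List (List Int) :=
  (c.2.1.map (fun frm => (c.1, frm.1)), c.2.1.map (fun cf => (PySem.Dict.mk cf.2).getD c.2.2 []))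

-- joint invariant of A's running state and B's bucket dict over the same prefix
def pvInv (d : PySem.Dict Int (String × List (String × List (String × List Int)) × String))
    (st : Nat × List (List Int) × List (String × String)) : Prop :=
  match PySem.List.max? d.keys (fun k => k) with
  | none => d = PySem.Dict.empty ∧ st = (1, [], [])
  | some L => ∃ c, d.get? L = some c ∧ (c.2.1.length : Int) = L ∧ 1 < c.2.1.length ∧
      st = (c.2.1.length, (pvOut c).2, (pvOut c).1)

lemma pvCommonFoldContains (t : List (String × List (String × List Int))) (k : String)
    (s : PySem.Set String) :
    (t.foldl (fun s cont => PySem.Set.inter s (PySem.Set.ofList (cont.2.map Prod.fst))) s).contains k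
      = (s.contains k && t.all (fun c => (PySem.Dict.mk c.2).contains k)) := by
  induction t generalizing s with
  | nil => simp
  | cons c t ih =>
      rw [List.foldl_cons, ih]
      have hstep : (PySem.Set.inter s (PySem.Set.ofList (c.2.map Prod.fst))).contains k
          = (s.contains k && (PySem.Dict.mk c.2).contains k) := by
        rw [Bool.eq_iff_iff]
        simp only [Bool.and_eq_true, PySem.Set.contains_iff, PySem.Set.mem_inter,
          PySem.Set.mem_ofList, PySem.Dict.contains_mk, List.any_eq_true, beq_iff_eq,
          List.mem_map]
      rw [hstep, List.all_cons, Bool.and_assoc]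

lemma pvCommonContains (frms : List (String × List (String × List Int))) (k : String)
    (hne : frms ≠ []) :
    (pvCommon frms).contains k = frms.all (fun c => (PySem.Dict.mk c.2).contains k) := by
  match frms with
  | [] => exact absurd rfl hne
  | c :: t =>
      unfold pvCommon
      rw [pvCommonFoldContains, List.all_cons]
      congr 1
      rw [Bool.eq_iff_iff]
      simp only [PySem.Set.contains_iff, PySem.Set.mem_ofList, PySem.Dict.contains_mk,
        List.any_eq_true, beq_iff_eq, List.mem_map]

lemma pvHfold (l : List (String × List (String × List Int))) (a b : Bool) :
    l.foldl (fun (h : Bool × Bool) cf =>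
      let h1 := if h.1 && !((PySem.Dict.mk cf.2).contains "ln") then false else h.1
      let h2 := if h.2 && !((PySem.Dict.mk cf.2).contains "lp") then false else h.2
      (h1, h2)) (a, b)
    = (a && l.all (fun c => (PySem.Dict.mk c.2).contains "ln"),
       b && l.all (fun c => (PySem.Dict.mk c.2).contains "lp")) := by
  induction l generalizing a b with
  | nil => simp
  | cons c t ih =>
      rw [List.foldl_cons]
      have estep :
          (let h1 := if (a, b).1 && !((PySem.Dict.mk c.2).contains "ln") then false else (a, b).1;
           let h2 := if (a, b).2 && !((PySem.Dict.mk c.2).contains "lp") then false else (a, b).2;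
           (h1, h2))
          = (a && (PySem.Dict.mk c.2).contains "ln", b && (PySem.Dict.mk c.2).contains "lp") := by
        cases a <;> cases b <;>
          cases hx : (PySem.Dict.mk c.2).contains "ln" <;>
          cases hy : (PySem.Dict.mk c.2).contains "lp" <;> simp_all
      rw [estep, ih]
      simp [Bool.and_assoc]

lemma pvKeyOf_len {frms : List (String × List (String × List Int))} {k : String}
    (hk : pvKeyOf frms = some k) : 1 < frms.length := by
  unfold pvKeyOf at hk
  split_ifs at hk <;> assumption

lemma pvContFold (frms : List (String × List (String × List Int))) (slc k : String)
    (hnd : (frms.map Prod.fst).Nodup) :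
    (pvSimplify frms slc).foldl (fun acc sf =>
        acc ++ [(PySem.Dict.mk ((PySem.Dict.mk frms).getD sf.2 [])).getD k []]) []
      = frms.map (fun cf => (PySem.Dict.mk cf.2).getD k []) := by
  unfold pvSimplify
  rw [PySem.List.foldl_append_singleton_eq_map, List.nil_append,
      PySem.List.foldl_append_singleton_eq_map, List.nil_append, List.map_map]
  refine List.map_congr_left (fun f hf => ?_)
  have hitem : (f.1, f.2) ∈ (PySem.Dict.mk frms).items := by simpa using hf
  have hkeys : (PySem.Dict.mk frms).keys.Nodup := by simpa [PySem.Dict.keys] using hnd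
  simp only [Function.comp_apply]
  rw [PySem.Dict.getD_of_mem_items _ hitem hkeys []]

lemma pvStepA_update (st : Nat × List (List Int) × List (String × String))
    (p : String × List (String × List (String × List Int)))
    (hnd : (p.2.map Prod.fst).Nodup) (k : String) (hk : pvKeyOf p.2 = some k)
    (hgt : st.1 < p.2.length) :
    pvStepA st p = (p.2.length, (pvOut (p.1, p.2, k)).2, (pvOut (p.1, p.2, k)).1) := by
  unfold pvStepA
  rw [if_pos hgt, pvHfold]
  have hlen : 1 < p.2.length := pvKeyOf_len hk
  unfold pvKeyOf at hk
  rw [if_pos hlen] at hk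
  split_ifs at hk with h1 h2
  · obtain rfl : "ln" = k := Option.some.inj hk
    simp only [h1, Bool.true_and, if_true]
    rw [pvContFold p.2 p.1 "ln" hnd]
    unfold pvSimplify
    rw [PySem.List.foldl_append_singleton_eq_map, List.nil_append]
    rfl
  · obtain rfl : "lp" = k := Option.some.inj hk
    simp only [Bool.true_and]
    rw [if_neg h1, if_pos h2]
    rw [pvContFold p.2 p.1 "lp" hnd]
    unfold pvSimplify
    rw [PySem.List.foldl_append_singleton_eq_map, List.nil_append]
    rfl

lemma pvStepA_skip (st : Nat × List (List Int) × List (String × String))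
    (p : String × List (String × List (String × List Int)))
    (hmax : 1 ≤ st.1) (hk : pvKeyOf p.2 = none) : pvStepA st p = st := by
  unfold pvStepA
  by_cases hg : p.2.length > st.1
  · rw [if_pos hg, pvHfold]
    have hlen : 1 < p.2.length := lt_of_le_of_lt hmax hg
    unfold pvKeyOf at hk
    rw [if_pos hlen] at hk
    split_ifs at hk with h1 h2
    simp only [Bool.true_and]
    rw [if_neg h1, if_neg h2]
  · rw [if_neg hg]

lemma pvStepB_eq (d : PySem.Dict Int (String × List (String × List (String × List Int)) × String))
    (p : String × List (String × List (String × List Int))) :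
    pvStepB d p = match pvKeyOf p.2 with
      | none => d
      | some k => d.setdefault (p.2.length : Int) (p.1, p.2, k) := by
  by_cases hlen : 1 < p.2.length
  · have hne : p.2 ≠ [] := by
      intro h
      rw [h] at hlen
      simp at hlen
    unfold pvStepB pvKeyOf
    rw [if_pos hlen, if_pos hlen, pvCommonContains p.2 "ln" hne, pvCommonContains p.2 "lp" hne]
    cases h1 : p.2.all (fun c => (PySem.Dict.mk c.2).contains "ln") <;>
      cases h2 : p.2.all (fun c => (PySem.Dict.mk c.2).contains "lp") <;> simp
  · unfold pvStepB pvKeyOf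
    rw [if_neg hlen, if_neg hlen]

lemma pvMaxAppendSome (ks : List Int) (x m : Int)
    (h : PySem.List.max? ks (fun k => k) = some m) :
    PySem.List.max? (ks ++ [x]) (fun k => k) = if m < x then some x else some m := by
  simp only [PySem.List.max?] at h ⊢
  rw [List.foldl_append, h]
  rfl

lemma pvMain (l : List (String × List (String × List (String × List Int))))
    (hnd : ∀ p ∈ l, (p.2.map Prod.fst).Nodup)
    (d : PySem.Dict Int (String × List (String × List (String × List Int)) × String))
    (st : Nat × List (List Int) × List (String × String))
    (hinv : pvInv d st) :
    pvInv (l.foldl pvStepB d) (l.foldl pvStepA st) := by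
  induction l generalizing d st with
  | nil => simpa using hinv
  | cons p t ih =>
      have hndp : (p.2.map Prod.fst).Nodup := hnd p List.mem_cons_self
      have hndt : ∀ q ∈ t, (q.2.map Prod.fst).Nodup := fun q hq => hnd q (List.mem_cons_of_mem _ hq)
      simp only [List.foldl_cons]
      refine ih hndt _ _ ?_
      cases hkk : pvKeyOf p.2 with
      | none =>
          simp only [pvStepB_eq, hkk]
          have hmax : 1 ≤ st.1 := by
            unfold pvInv at hinv
            cases hmx : PySem.List.max? d.keys (fun k => k) with
            | none => rw [hmx] at hinv; rw [hinv.2]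
            | some L =>
                rw [hmx] at hinv
                obtain ⟨c, -, -, hclen, hst⟩ := hinv
                rw [hst]
                exact le_of_lt hclen
          rw [pvStepA_skip st p hmax hkk]
          exact hinv
      | some k =>
          simp only [pvStepB_eq, hkk]
          have hlen2 : 1 < p.2.length := pvKeyOf_len hkk
          unfold pvInv at hinv ⊢
          cases hmx : PySem.List.max? d.keys (fun k => k) with
          | none =>
              rw [hmx] at hinv
              obtain ⟨hd, hst⟩ := hinv
              subst hd
              have hc : (PySem.Dict.empty :
                  PySem.Dict Int (String × List (String × List (String × List Int)) × String)).contains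
                  ((p.2.length : Int)) = false := by simp
              rw [PySem.Dict.setdefault_of_not_contains _ _ hc,
                PySem.Dict.keys_insert_of_not_contains _ _ hc]
              have hke : (PySem.Dict.empty :
                  PySem.Dict Int (String × List (String × List (String × List Int)) × String)).keys
                  = [] := rfl
              rw [hke, List.nil_append]
              have hmx1 : PySem.List.max? [(p.2.length : Int)] (fun k => k)
                  = some ((p.2.length : Int)) := rfl
              rw [hmx1]
              refine ⟨(p.1, p.2, k), PySem.Dict.get?_insert_self _ _ _, rfl, hlen2, ?_⟩
              have hgt : st.1 < p.2.length := by rw [hst]; exact hlen2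
              rw [pvStepA_update st p hndp k hkk hgt]
          | some L =>
              rw [hmx] at hinv
              obtain ⟨c, hget, hcast, hclen, hst⟩ := hinv
              by_cases hcont : d.contains ((p.2.length : Int)) = true
              · rw [PySem.Dict.setdefault_of_contains _ _ hcont, hmx]
                have hmemk : ((p.2.length : Int)) ∈ d.keys :=
                  (PySem.Dict.contains_iff_mem_keys d _).mp hcont
                have hle : ((p.2.length : Int)) ≤ L := PySem.List.max?_isMax hmx _ hmemk
                have hng : ¬ (p.2.length > st.1) := by
                  rw [hst]
                  omega
                have hskip : pvStepA st p = st := by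
                  unfold pvStepA
                  rw [if_neg hng]
                rw [hskip]
                exact ⟨c, hget, hcast, hclen, hst⟩
              · have hc : d.contains ((p.2.length : Int)) = false :=
                  Bool.eq_false_iff.mpr hcont
                rw [PySem.Dict.setdefault_of_not_contains _ _ hc,
                  PySem.Dict.keys_insert_of_not_contains _ _ hc,
                  pvMaxAppendSome d.keys _ L hmx]
                by_cases hlt : L < ((p.2.length : Int))
                · rw [if_pos hlt]
                  refine ⟨(p.1, p.2, k), PySem.Dict.get?_insert_self _ _ _, rfl, hlen2, ?_⟩
                  have hgt : st.1 < p.2.length := by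
                    rw [hst]
                    omega
                  rw [pvStepA_update st p hndp k hkk hgt]
                · rw [if_neg hlt]
                  have hLmem : L ∈ d.keys :=
                    PySem.Dict.mem_keys_of_mem_items _ (PySem.Dict.mem_items_of_get?_eq_some _ hget)
                  have hne : L ≠ ((p.2.length : Int)) := by
                    intro h
                    rw [h] at hLmem
                    exact hcont ((PySem.Dict.contains_iff_mem_keys d _).mpr hLmem)
                  have hng : ¬ (p.2.length > st.1) := by
                    rw [hst]
                    omega
                  have hskip : pvStepA st p = st := by
                    unfold pvStepA
                    rw [if_neg hng]
                  rw [hskip]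
                  refine ⟨c, ?_, hcast, hclen, hst⟩
                  rw [PySem.Dict.get?_insert_of_ne _ _ hne]
                  exact hget

-- ===== VERDICT (by name: the statement is the Claim_ definition above) =====
theorem get_frames_and_contours_spec : Claim_equal_get_frames_and_contours := by
  intro contours _ hpre
  obtain ⟨-, hnd2, -⟩ := hpre
  have hinv0 : pvInv PySem.Dict.empty (1, [], []) := by unfold pvInv; exact ⟨rfl, rfl⟩
  have h := pvMain contours (fun q hq => (hnd2 q hq).1) PySem.Dict.empty (1, [], []) hinv0
  show (_, _) = get_frames_and_contours_alt contours
  unfold pvInv at h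
  cases hmx : PySem.List.max? (List.foldl pvStepB PySem.Dict.empty contours).keys (fun k => k) with
  | none =>
      rw [hmx] at h
      simp only [get_frames_and_contours_alt, hmx, h.2]
  | some L =>
      rw [hmx] at h
      obtain ⟨c, hget, hlen, -, hst⟩ := h
      simp only [get_frames_and_contours_alt, hmx, hst,
        PySem.Dict.getD_of_get?_eq_some _ _ hget]
      rfl
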